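-- pv_equiv track=rewrite | github.com/arifanzum/codeProblemSolves | testing.py | biscuit
-- ===== SOURCE A (Python) =====
-- def biscuit(num):
--     free = 0
--     initial = 0
--     if num % 2 ==0:
--         for i in range(num):
--             initial = initial +2
--             if initial < num:
--                 free = free+1
--                 initial = initial +1
--     else:
--         for i in range(num - 1):
--             initial = initial + 2
--             if initial < num:
--                 free = free + 1
--                 initial = initial + 1
--
--     cost = (num - free) * 5
--     return cost
-- ===== SOURCE B (Python) =====
-- def biscuit(num):
--     free = num // 3 if num > 0 else 0
--     return (num - free) * 5
-- ===== Notes on version B (the rewrite author's own statement) =====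
-- stated objective: faster
-- what changed: Replaced the per-biscuit simulation loop by a closed-form arithmetic free count (floor division), computing the cost directly without iterating.
import Mathlib
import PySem

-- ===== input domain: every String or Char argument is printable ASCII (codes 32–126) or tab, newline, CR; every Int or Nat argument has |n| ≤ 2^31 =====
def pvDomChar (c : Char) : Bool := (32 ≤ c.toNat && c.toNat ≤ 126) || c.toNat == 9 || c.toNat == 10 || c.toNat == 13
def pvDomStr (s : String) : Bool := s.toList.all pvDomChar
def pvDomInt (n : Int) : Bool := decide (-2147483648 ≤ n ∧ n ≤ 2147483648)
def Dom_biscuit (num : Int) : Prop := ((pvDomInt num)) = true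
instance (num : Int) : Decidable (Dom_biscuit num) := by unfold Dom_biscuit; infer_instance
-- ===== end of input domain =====

-- B replaces A's per-biscuit simulation loop by the closed-form free count num // 3 (asymptotically faster).


-- ===== PORT A =====
def biscuit (num : Int) : Int :=
  let body := fun (s : Int × Int) (_ : Int) =>
    let initial := s.2 + 2
    if initial < num then (s.1 + 1, initial + 1) else (s.1, initial)
  let s :=
    if PySem.Int.mod num 2 = 0 then
      (PySem.List.pyRange 0 num 1).foldl body (0, 0)
    else
      (PySem.List.pyRange 0 (num - 1) 1).foldl body (0, 0)
  (num - s.1) * 5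

-- ===== PORT B =====
def biscuit_alt (num : Int) : Int :=
  let free := if 0 < num then PySem.Int.floordiv num 3 else 0
  (num - free) * 5

-- ===== PRECONDITION & SPEC =====
def Spec_biscuit (num : Int) (out : Int) : Prop := out = biscuit_alt num
instance (num : Int) (out : Int) : Decidable (Spec_biscuit num out) := by unfold Spec_biscuit; infer_instance

-- ===== CLAIM (what is proved, stated in full; the proofs are below) =====
def Claim_equal_biscuit : Prop := ∀ (num : Int), Dom_biscuit num → Spec_biscuit num (biscuit num)

-- ===== LEMMAS AND PROOFS =====

-- the saturation point of A's loop: the number of iterations that take the success branch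
def pvT (num : Int) : Int := if 3 ≤ num then num / 3 else 0

theorem pvT_nonneg (num : Int) : 0 ≤ pvT num := by
  unfold pvT; split <;> omega

theorem pvT_upper (num : Int) : num ≤ 3 * pvT num + 2 := by
  unfold pvT; split <;> omega

theorem pvT_succ (num : Int) (j : Int) (h0 : 0 ≤ j) (h : j < pvT num) : 3 * j + 2 < num := by
  unfold pvT at h; split at h <;> omega

theorem loop_closed (num : Int) (k : Nat) :
    (PySem.List.pyRange 0 (k : Int) 1).foldl
      (fun (s : Int × Int) (_ : Int) =>
        let initial := s.2 + 2
        if initial < num then (s.1 + 1, initial + 1) else (s.1, initial)) (0, 0)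
    = (min (k : Int) (pvT num),
       3 * min (k : Int) (pvT num) + 2 * ((k : Int) - min (k : Int) (pvT num))) := by
  have ht0 := pvT_nonneg num
  have ht1 := pvT_upper num
  induction k with
  | zero =>
    rw [show ((0 : Nat) : Int) = 0 by norm_num, PySem.List.pyRange_one_eq_nil le_rfl]
    simp [Prod.ext_iff]; omega
  | succ k ih =>
    have h2 := pvT_succ num k (by positivity)
    have hc : ((k + 1 : Nat) : Int) = (k : Int) + 1 := by push_cast; ring
    rw [hc, PySem.List.pyRange_one_succ_right (by positivity), List.foldl_append, ih]
    by_cases hk : (k : Int) < pvT num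
    · have hmin : min (k : Int) (pvT num) = (k : Int) := by omega
      rw [hmin]
      simp only [List.foldl]
      rw [if_pos (by have := h2 hk; omega)]
      simp [Prod.ext_iff]; omega
    · have hmin : min (k : Int) (pvT num) = pvT num := by omega
      rw [hmin]
      simp only [List.foldl]
      rw [if_neg (by omega)]
      simp [Prod.ext_iff]; omega

-- ===== VERDICT (by name: the statement is the Claim_ definition above) =====
theorem biscuit_spec : Claim_equal_biscuit := by
  intro num _
  unfold Spec_biscuit biscuit biscuit_alt
  dsimp only
  have ht0 := pvT_nonneg num
  have htv : 0 < num → pvT num = PySem.Int.floordiv num 3 := by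
    intro h
    rw [PySem.Int.floordiv_eq_ediv_of_pos (by norm_num)]
    unfold pvT; split <;> omega
  by_cases hpos : 0 < num
  · by_cases hm : PySem.Int.mod num 2 = 0
    · have hk : ((num.toNat : Nat) : Int) = num := Int.toNat_of_nonneg (by omega)
      rw [if_pos hm, ← hk, loop_closed]
      rw [hk]
      have htn : pvT num ≤ (num.toNat : Int) := by
        unfold pvT; split <;> omega
      rw [htv hpos] at htn ⊢
      simp only [if_pos hpos]
      omega
    · have hk : (((num - 1).toNat : Nat) : Int) = num - 1 := Int.toNat_of_nonneg (by omega)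
      rw [if_neg hm, ← hk, loop_closed]
      rw [hk]
      -- pvT num ≤ num - 1 : for num ≥ 3, num / 3 ≤ num - 1; for num ∈ {1, 2}, pvT = 0
      have htn : pvT num ≤ ((num - 1).toNat : Int) := by
        unfold pvT; split <;> omega
      rw [htv hpos] at htn ⊢
      simp only [if_pos hpos]
      omega
  · have h1 : PySem.List.pyRange 0 num 1 = [] := PySem.List.pyRange_one_eq_nil (by omega)
    have h2 : PySem.List.pyRange 0 (num - 1) 1 = [] := PySem.List.pyRange_one_eq_nil (by omega)
    simp only [h1, h2, List.foldl_nil, if_neg hpos]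
    split <;> ring
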